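-- pv_equiv track=rewrite | github.com/adityamishra5050/AI-Constraint-Search-Problem | ai_assignment_question_2(ii).py | aroma_consistency
-- ===== SOURCE A (Python) =====
-- def aroma_consistency(remaining_pots, soup_pot, chef):
--     queue = [(soup_pot, chef)]
--     while queue:
--         current_pot, current_chef = queue.pop(0)
--         for other_pot in remaining_pots:
--             if other_pot != current_pot and current_chef in remaining_pots[other_pot]:
--                 remaining_pots[other_pot].remove(current_chef)
--                 if len(remaining_pots[other_pot]) == 0:
--                     return False
--                 if len(remaining_pots[other_pot]) == 1:
--                     queue.append((other_pot, remaining_pots[other_pot][0]))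
--     return True
-- ===== SOURCE B (Python) =====
-- def aroma_consistency(remaining_pots, soup_pot, chef):
--     # Multiset view of each pot's domain (chef->count map plus maintained size and
--     # element sum) and a chef->pots index: a propagation step touches only the
--     # pots whose initial domain contains the chef, and the lone survivor of a
--     # singleton domain is read off the maintained sum; the queue is read with a
--     # cursor, not pop(0).  B does not mutate remaining_pots (A does); the
--     # equivalence is about the return value.
--     counts = {}
--     sizes = {}
--     sums = {}
--     index = {}
--     for pot, dom in remaining_pots.items():
--         m = {}
--         for c in dom:
--             m[c] = m.get(c, 0) + 1
--         counts[pot] = m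
--         sizes[pot] = len(dom)
--         sums[pot] = sum(dom)
--         for c in m:
--             index.setdefault(c, []).append(pot)
--     queue = [(soup_pot, chef)]
--     i = 0
--     while i < len(queue):
--         pot, c = queue[i]
--         i += 1
--         for other in index.get(c, ()):
--             m = counts[other]
--             if other != pot and m.get(c, 0) > 0:
--                 m[c] -= 1
--                 sizes[other] -= 1
--                 sums[other] -= c
--                 if sizes[other] == 0:
--                     return False
--                 if sizes[other] == 1:
--                     queue.append((other, sums[other]))
--     return True
-- ===== Notes on version B (the rewrite author's own statement) =====
-- stated objective: alternative
-- what changed: B replaces A's per-queue-item scan of every pot with list membership/removal by a one-pass set-up that builds, per pot, a chef->count map plus its maintained size and element sum, and a chef->pots index, so each propagation step touches only the pots whose initial domain contains the chef, with O(1) membership test, decrement and singleton extraction (the lone survivor is read off the maintained sum), and the queue is consumed with a cursor instead of O(n) pop(0); …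
import Mathlib
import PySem

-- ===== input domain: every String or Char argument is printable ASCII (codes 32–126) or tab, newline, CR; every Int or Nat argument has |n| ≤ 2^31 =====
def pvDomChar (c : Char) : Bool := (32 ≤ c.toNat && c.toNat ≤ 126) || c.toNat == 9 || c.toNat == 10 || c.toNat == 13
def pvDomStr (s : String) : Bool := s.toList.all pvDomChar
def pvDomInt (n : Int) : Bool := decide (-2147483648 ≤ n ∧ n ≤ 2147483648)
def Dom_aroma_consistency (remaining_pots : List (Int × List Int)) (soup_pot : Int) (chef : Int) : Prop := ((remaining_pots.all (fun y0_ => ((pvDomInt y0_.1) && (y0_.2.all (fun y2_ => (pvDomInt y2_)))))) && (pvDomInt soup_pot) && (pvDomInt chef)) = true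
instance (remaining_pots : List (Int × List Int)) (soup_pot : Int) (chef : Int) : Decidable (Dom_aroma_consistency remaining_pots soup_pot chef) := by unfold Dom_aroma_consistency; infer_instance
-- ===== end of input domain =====

-- B trades A's per-step scan of every pot with list membership/removal for a multiset
-- view (chef→count map plus maintained size and sum per pot) driven by a chef→pots
-- index; equivalence is about the RETURN value (A mutates the dict in place, B does not).

-- ===== PORT A =====
-- total size of all domains; used only to compute a fuel bound that makes the
-- while-loop total (the loop performs at most 2*size+1 iterations)
def pvSize (d : PySem.Dict Int (List Int)) : Nat := (d.values.map List.length).sum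

-- A's inner 'for other_pot in remaining_pots:' over the pots in l; returns none where
-- the Python returns False, else the updated dict and the items appended to the queue
def pvSweep : List Int → PySem.Dict Int (List Int) → Int → Int →
    Option (PySem.Dict Int (List Int) × List (Int × Int))
  | [], d, _, _ => some (d, [])
  | k :: ks, d, p, c =>
    let dom := d.getD k []
    if k ≠ p ∧ c ∈ dom then
      -- remove? is some here since c ∈ dom
      let dom' := (PySem.List.remove? dom c).getD []
      let d' := d.insert k dom'
      if dom'.length = 0 then none
      else
        match pvSweep ks d' p c with
        | none => none
        | some (d'', adds) =>
          -- dom'[0]: dom' is nonempty in the length-1 branch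
          some (d'', (if dom'.length = 1 then [(k, dom'.headI)] else []) ++ adds)
    else pvSweep ks d p c

-- A's while-loop: pop the queue head, sweep ALL pots (the dict's keys).  The fuel only
-- makes the recursion structural; each iteration strictly decreases 2*pvSize+|queue|,
-- so the initial fuel 2*pvSize+1 is never exhausted.
def pvLoopA : Nat → PySem.Dict Int (List Int) → List (Int × Int) → Bool
  | 0, _, _ => true
  | _ + 1, _, [] => true
  | fuel + 1, d, (p, c) :: rest =>
    match pvSweep d.keys d p c with
    | none => false
    | some (d', adds) => pvLoopA fuel d' (rest ++ adds)

def aroma_consistency (remaining_pots : List (Int × List Int)) (soup_pot : Int) (chef : Int) : Bool :=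
  let d := PySem.Dict.ofList remaining_pots
  pvLoopA (2 * pvSize d + 1) d [(soup_pot, chef)]

-- ===== PORT B =====
-- one step of B's set-up loop: per pot build its chef→count map m (the inner
-- 'm[c] = m.get(c, 0) + 1' loop), record len(dom) and sum(dom), and append the pot
-- under each distinct chef of m into the chef→pots index ('setdefault(c, []).append')
def pvBuildStep
    (st : PySem.Dict Int (PySem.Dict Int Int) × PySem.Dict Int Int × PySem.Dict Int Int ×
          PySem.Dict Int (List Int))
    (kv : Int × List Int) :
    PySem.Dict Int (PySem.Dict Int Int) × PySem.Dict Int Int × PySem.Dict Int Int ×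
      PySem.Dict Int (List Int) :=
  let m := kv.2.foldl (fun m c => m.insert c (m.getD c 0 + 1)) PySem.Dict.empty
  (st.1.insert kv.1 m,
   st.2.1.insert kv.1 (kv.2.length : Int),
   st.2.2.1.insert kv.1 kv.2.sum,
   m.keys.foldl (fun idx c => idx.modify c [] (· ++ [kv.1])) st.2.2.2)

-- B's inner 'for other in index.get(c, ()):' over the indexed pots l, on the
-- counter/size/sum state; none where the Python returns False
def pvSweepB : List Int → PySem.Dict Int (PySem.Dict Int Int) → PySem.Dict Int Int →
    PySem.Dict Int Int → Int → Int →
    Option (PySem.Dict Int (PySem.Dict Int Int) × PySem.Dict Int Int × PySem.Dict Int Int ×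
            List (Int × Int))
  | [], cnt, sz, sm, _, _ => some (cnt, sz, sm, [])
  | k :: ks, cnt, sz, sm, p, c =>
    let m := cnt.getD k PySem.Dict.empty
    if k ≠ p ∧ 0 < m.getD c 0 then
      let n := sz.getD k 0 - 1
      let s := sm.getD k 0 - c
      if n = 0 then none
      else
        match pvSweepB ks (cnt.insert k (m.insert c (m.getD c 0 - 1)))
            (sz.insert k n) (sm.insert k s) p c with
        | none => none
        | some (cnt', sz', sm', adds) =>
          some (cnt', sz', sm', (if n = 1 then [(k, s)] else []) ++ adds)
    else pvSweepB ks cnt sz sm p c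

-- B's while-loop: the read cursor makes the pending queue the suffix 'rest ++ adds';
-- only the pots indexed under the propagated chef are swept (same fuel device as pvLoopA)
def pvLoopB : Nat → PySem.Dict Int (List Int) → PySem.Dict Int (PySem.Dict Int Int) →
    PySem.Dict Int Int → PySem.Dict Int Int → List (Int × Int) → Bool
  | 0, _, _, _, _, _ => true
  | _ + 1, _, _, _, _, [] => true
  | fuel + 1, idx, cnt, sz, sm, (p, c) :: rest =>
    match pvSweepB (idx.getD c []) cnt sz sm p c with
    | none => false
    | some (cnt', sz', sm', adds) => pvLoopB fuel idx cnt' sz' sm' (rest ++ adds)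

def aroma_consistency_alt (remaining_pots : List (Int × List Int)) (soup_pot : Int) (chef : Int) : Bool :=
  let d := PySem.Dict.ofList remaining_pots
  let st := d.items.foldl pvBuildStep
      (PySem.Dict.empty, PySem.Dict.empty, PySem.Dict.empty, PySem.Dict.empty)
  pvLoopB (2 * pvSize d + 1) st.2.2.2 st.1 st.2.1 st.2.2.1 [(soup_pot, chef)]

-- ===== PRECONDITION & SPEC =====
def Spec_aroma_consistency (remaining_pots : List (Int × List Int)) (soup_pot : Int) (chef : Int) (out : Bool) : Prop := out = aroma_consistency_alt remaining_pots soup_pot chef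
instance (remaining_pots : List (Int × List Int)) (soup_pot : Int) (chef : Int) (out : Bool) : Decidable (Spec_aroma_consistency remaining_pots soup_pot chef out) := by unfold Spec_aroma_consistency; infer_instance

-- ===== CLAIM (what is proved, stated in full; the proofs are below) =====
def Claim_equal_aroma_consistency : Prop := ∀ (remaining_pots : List (Int × List Int)) (soup_pot : Int) (chef : Int), Dom_aroma_consistency remaining_pots soup_pot chef → Spec_aroma_consistency remaining_pots soup_pot chef (aroma_consistency remaining_pots soup_pot chef)

-- ===== LEMMAS AND PROOFS =====

-- the simulation invariant tying A's list state d to B's counter/size/sum state and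
-- the (fixed) index: same keys, per-pot multiset agreement, index covers the domains
def pvRel (d : PySem.Dict Int (List Int)) (cnt : PySem.Dict Int (PySem.Dict Int Int))
    (sz sm : PySem.Dict Int Int) (idx : PySem.Dict Int (List Int)) : Prop :=
  cnt.keys = d.keys ∧ d.keys.Nodup ∧
  (∀ k x, (cnt.getD k PySem.Dict.empty).getD x 0 = ((d.getD k []).count x : Int)) ∧
  (∀ k, sz.getD k 0 = ((d.getD k []).length : Int)) ∧
  (∀ k, sm.getD k 0 = (d.getD k []).sum) ∧
  (∀ c, (idx.getD c []).Sublist d.keys) ∧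
  (∀ k c, c ∈ d.getD k [] → k ∈ idx.getD c [])

-- a sweep of A keeps the key list and only shrinks domains (membership-wise)
theorem pvSweep_some {l : List Int} {d d' : PySem.Dict Int (List Int)} {p c : Int}
    {adds : List (Int × Int)} (h : pvSweep l d p c = some (d', adds)) :
    d'.keys = d.keys ∧ ∀ k x, x ∈ d'.getD k [] → x ∈ d.getD k [] := by
  induction l generalizing d d' adds with
  | nil => simp only [pvSweep, Option.some.injEq, Prod.mk.injEq] at h; exact ⟨by rw [h.1], by intro k x; rw [h.1]; exact id⟩
  | cons k ks ih =>
    simp only [pvSweep] at h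
    by_cases hc : k ≠ p ∧ c ∈ d.getD k []
    · rw [if_pos hc] at h
      by_cases hz : ((PySem.List.remove? (d.getD k []) c).getD []).length = 0
      · rw [if_pos hz] at h; exact absurd h (by simp)
      · rw [if_neg hz] at h
        rcases hrec : pvSweep ks (d.insert k ((PySem.List.remove? (d.getD k []) c).getD [])) p c with _ | ⟨d'', adds''⟩
        · rw [hrec] at h; exact absurd h (by simp)
        · rw [hrec] at h
          simp only [Option.some.injEq, Prod.mk.injEq] at h
          obtain ⟨hd, _⟩ := h
          subst hd
          obtain ⟨hk1, hk2⟩ := ih hrec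
          have hcont : d.contains k = true := by
            by_contra hnc
            have : d.getD k ([] : List Int) = [] :=
              PySem.Dict.getD_of_not_contains (d := d) (k := k) [] (by simpa using hnc)
            rw [this] at hc; exact absurd hc.2 (by simp)
          have herase : (PySem.List.remove? (d.getD k []) c).getD [] = (d.getD k []).erase c := by
            rw [PySem.List.remove?_eq_some_erase (d.getD k []) c hc.2]; rfl
          constructor
          · rw [hk1, PySem.Dict.keys_insert_of_contains d _ hcont]
          · intro j x hx
            have hx2 := hk2 j x hx
            rw [PySem.Dict.getD_insert] at hx2
            by_cases hjk : j = k
            · rw [if_pos hjk, herase] at hx2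
              rw [hjk]; exact List.mem_of_mem_erase hx2
            · rwa [if_neg hjk] at hx2
    · rw [if_neg hc] at h
      exact ih h

-- sweeping only a sub-list of the pots gives the same outcome on B's state, provided
-- every pot the test could fire on is in the sub-list (the count recheck makes the
-- skipped pots inert)
theorem pvSweepB_congr {l l' : List Int} {cnt : PySem.Dict Int (PySem.Dict Int Int)}
    {sz sm : PySem.Dict Int Int} {p c : Int}
    (hsub : l'.Sublist l) (hnd : l.Nodup)
    (hmem : ∀ k ∈ l, k ≠ p → 0 < (cnt.getD k PySem.Dict.empty).getD c 0 → k ∈ l') :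
    pvSweepB l cnt sz sm p c = pvSweepB l' cnt sz sm p c := by
  induction l generalizing l' cnt sz sm with
  | nil => rw [List.sublist_nil.mp hsub]
  | cons k ks ih =>
    have hndtail : ks.Nodup := hnd.of_cons
    have hknotin : k ∉ ks := (List.nodup_cons.mp hnd).1
    by_cases hk : k ∈ l'
    · obtain ⟨t', rfl, ht'⟩ : ∃ t', l' = k :: t' ∧ t'.Sublist ks := by
        cases hsub with
        | cons _ h => exact absurd (h.mem hk) hknotin
        | cons₂ _ h => exact ⟨_, rfl, h⟩
      by_cases hc : k ≠ p ∧ 0 < (cnt.getD k PySem.Dict.empty).getD c 0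
      · simp only [pvSweepB, if_pos hc]
        have heq := ih (cnt := cnt.insert k ((cnt.getD k PySem.Dict.empty).insert c
              ((cnt.getD k PySem.Dict.empty).getD c 0 - 1)))
          (sz := sz.insert k (sz.getD k 0 - 1)) (sm := sm.insert k (sm.getD k 0 - c))
          ht' hndtail (by
            intro j hj hjp hjc
            have hjk : j ≠ k := fun h => hknotin (h ▸ hj)
            rw [PySem.Dict.getD_insert, if_neg hjk] at hjc
            have := hmem j (List.mem_cons_of_mem _ hj) hjp hjc
            rcases List.mem_cons.mp this with h | h
            · exact absurd h hjk
            · exact h)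
        rw [heq]
      · simp only [pvSweepB, if_neg hc]
        exact ih ht' hndtail (by
          intro j hj hjp hjc
          have hjk : j ≠ k := fun h => hknotin (h ▸ hj)
          have := hmem j (List.mem_cons_of_mem _ hj) hjp hjc
          rcases List.mem_cons.mp this with h | h
          · exact absurd h hjk
          · exact h)
    · have hl'ks : l'.Sublist ks := by
        cases hsub with
        | cons _ h => exact h
        | cons₂ _ h => exact absurd List.mem_cons_self hk
      have hcfalse : ¬ (k ≠ p ∧ 0 < (cnt.getD k PySem.Dict.empty).getD c 0) := fun hc =>
        hk (hmem k List.mem_cons_self hc.1 hc.2)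
      simp only [pvSweepB, if_neg hcfalse]
      exact ih hl'ks hndtail (fun j hj hjp hjc => hmem j (List.mem_cons_of_mem _ hj) hjp hjc)

-- one sweep of A on the list state and one sweep of B on the counter/size/sum state,
-- over the SAME pot list, fail together or succeed with the same queue additions and
-- related resulting states
theorem pvSweepSim : ∀ (l : List Int) (d : PySem.Dict Int (List Int))
    (cnt : PySem.Dict Int (PySem.Dict Int Int)) (sz sm : PySem.Dict Int Int) (p c : Int),
    (∀ k x, (cnt.getD k PySem.Dict.empty).getD x 0 = ((d.getD k []).count x : Int)) →
    (∀ k, sz.getD k 0 = ((d.getD k []).length : Int)) →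
    (∀ k, sm.getD k 0 = (d.getD k []).sum) →
    (pvSweep l d p c = none ∧ pvSweepB l cnt sz sm p c = none) ∨
    (∃ d' cnt' sz' sm' adds, pvSweep l d p c = some (d', adds) ∧
       pvSweepB l cnt sz sm p c = some (cnt', sz', sm', adds) ∧
       (∀ k x, (cnt'.getD k PySem.Dict.empty).getD x 0 = ((d'.getD k []).count x : Int)) ∧
       (∀ k, sz'.getD k 0 = ((d'.getD k []).length : Int)) ∧
       (∀ k, sm'.getD k 0 = (d'.getD k []).sum) ∧ cnt'.keys = cnt.keys) := by
  intro l
  induction l with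
  | nil =>
    intro d cnt sz sm p c hcnt hsz hsm
    right; exact ⟨d, cnt, sz, sm, [], rfl, rfl, hcnt, hsz, hsm, rfl⟩
  | cons k ks ih =>
    intro d cnt sz sm p c hcnt hsz hsm
    by_cases hc : k ≠ p ∧ c ∈ d.getD k []
    · have hcpos : 0 < (d.getD k []).count c := List.count_pos_iff.mpr hc.2
      have hcond : k ≠ p ∧ 0 < (cnt.getD k PySem.Dict.empty).getD c 0 := by
        refine ⟨hc.1, ?_⟩
        rw [hcnt k c]
        exact_mod_cast hcpos
      have herase : (PySem.List.remove? (d.getD k []) c).getD [] = (d.getD k []).erase c := by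
        rw [PySem.List.remove?_eq_some_erase (d.getD k []) c hc.2]; rfl
      have hlen : ((d.getD k []).erase c).length + 1 = (d.getD k []).length :=
        List.length_erase_add_one hc.2
      have hn : sz.getD k 0 - 1 = (((d.getD k []).erase c).length : Int) := by
        rw [hsz k]; omega
      have hsum : sm.getD k 0 - c = ((d.getD k []).erase c).sum := by
        have hperm := (List.perm_cons_erase hc.2).sum_eq
        rw [List.sum_cons] at hperm
        rw [hsm k]; linarith
      simp only [pvSweep, pvSweepB, if_pos hc, if_pos hcond, herase]
      by_cases hz : ((d.getD k []).erase c).length = 0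
      · have hz' : sz.getD k 0 - 1 = 0 := by rw [hn, hz]; rfl
        rw [if_pos hz, if_pos hz']
        exact Or.inl ⟨rfl, rfl⟩
      · have hz' : ¬ (sz.getD k 0 - 1 = 0) := by
          rw [hn]; exact_mod_cast hz
        rw [if_neg hz, if_neg hz']
        -- the updated states are again related
        have hcnt₁ : ∀ j x,
            ((cnt.insert k ((cnt.getD k PySem.Dict.empty).insert c
                ((cnt.getD k PySem.Dict.empty).getD c 0 - 1))).getD j PySem.Dict.empty).getD x 0
            = (((d.insert k ((d.getD k []).erase c)).getD j []).count x : Int) := by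
          intro j x
          rw [PySem.Dict.getD_insert, PySem.Dict.getD_insert]
          by_cases hj : j = k
          · rw [if_pos hj, if_pos hj, PySem.Dict.getD_insert]
            by_cases hx : x = c
            · subst hx
              rw [if_pos rfl, hcnt k x, List.count_erase_self]
              omega
            · rw [if_neg hx, hcnt k x, List.count_erase_of_ne hx]
          · rw [if_neg hj, if_neg hj]; exact hcnt j x
        have hsz₁ : ∀ j, (sz.insert k (sz.getD k 0 - 1)).getD j 0
            = (((d.insert k ((d.getD k []).erase c)).getD j []).length : Int) := by
          intro j
          rw [PySem.Dict.getD_insert, PySem.Dict.getD_insert]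
          by_cases hj : j = k
          · rw [if_pos hj, if_pos hj, hn]
          · rw [if_neg hj, if_neg hj]; exact hsz j
        have hsm₁ : ∀ j, (sm.insert k (sm.getD k 0 - c)).getD j 0
            = ((d.insert k ((d.getD k []).erase c)).getD j []).sum := by
          intro j
          rw [PySem.Dict.getD_insert, PySem.Dict.getD_insert]
          by_cases hj : j = k
          · rw [if_pos hj, if_pos hj, hsum]
          · rw [if_neg hj, if_neg hj]; exact hsm j
        have hcontc : cnt.contains k = true := by
          by_contra hnc
          have : cnt.getD k (PySem.Dict.empty : PySem.Dict Int Int) = PySem.Dict.empty :=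
            PySem.Dict.getD_of_not_contains (d := cnt) (k := k) _ (by simpa using hnc)
          rw [this] at hcond
          simp [PySem.Dict.getD_empty] at hcond
        have hkeys₁ : (cnt.insert k ((cnt.getD k PySem.Dict.empty).insert c
            ((cnt.getD k PySem.Dict.empty).getD c 0 - 1))).keys = cnt.keys :=
          PySem.Dict.keys_insert_of_contains cnt _ hcontc
        rcases ih (d.insert k ((d.getD k []).erase c))
            (cnt.insert k ((cnt.getD k PySem.Dict.empty).insert c
              ((cnt.getD k PySem.Dict.empty).getD c 0 - 1)))
            (sz.insert k (sz.getD k 0 - 1)) (sm.insert k (sm.getD k 0 - c)) p c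
            hcnt₁ hsz₁ hsm₁ with hnone | hsome
        · rw [hnone.1, hnone.2]
          exact Or.inl ⟨rfl, rfl⟩
        · obtain ⟨d', cnt', sz', sm', adds, hA, hB, h1, h2, h3, h4⟩ := hsome
          rw [hA, hB]
          right
          refine ⟨d', cnt', sz', sm',
            (if ((d.getD k []).erase c).length = 1
              then [(k, ((d.getD k []).erase c).headI)] else []) ++ adds,
            rfl, ?_, h1, h2, h3, h4.trans hkeys₁⟩
          by_cases h1len : ((d.getD k []).erase c).length = 1
          · have h1' : sz.getD k 0 - 1 = 1 := by rw [hn, h1len]; rfl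
            rw [if_pos h1len, if_pos h1']
            obtain ⟨x, hx⟩ := List.length_eq_one_iff.mp h1len
            rw [hsum, hx]
            simp
          · have h1' : ¬ (sz.getD k 0 - 1 = 1) := by
              rw [hn]; exact_mod_cast h1len
            rw [if_neg h1len, if_neg h1']
    · have hcond : ¬ (k ≠ p ∧ 0 < (cnt.getD k PySem.Dict.empty).getD c 0) := by
        intro h
        refine hc ⟨h.1, ?_⟩
        have := h.2
        rw [hcnt k c] at this
        exact List.count_pos_iff.mp (by exact_mod_cast this)
      simp only [pvSweep, pvSweepB, if_neg hc, if_neg hcond]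
      exact ih d cnt sz sm p c hcnt hsz hsm

-- the two loops agree step for step: A's sweep of ALL keys matches B's sweep of the
-- indexed pots, and the invariant persists
theorem pvLoopSim : ∀ (fuel : Nat) (idx : PySem.Dict Int (List Int))
    (d : PySem.Dict Int (List Int)) (cnt : PySem.Dict Int (PySem.Dict Int Int))
    (sz sm : PySem.Dict Int Int) (q : List (Int × Int)),
    pvRel d cnt sz sm idx → pvLoopA fuel d q = pvLoopB fuel idx cnt sz sm q := by
  intro fuel
  induction fuel with
  | zero => intro idx d cnt sz sm q _; rfl
  | succ fuel ihf =>
    intro idx d cnt sz sm q hrel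
    obtain ⟨hkeys, hnd, hcnt, hsz, hsm, hidxsub, hidxcov⟩ := hrel
    match q with
    | [] => rfl
    | (p, c) :: rest =>
      have hcongr : pvSweepB cnt.keys cnt sz sm p c = pvSweepB (idx.getD c []) cnt sz sm p c := by
        refine pvSweepB_congr (hkeys ▸ hidxsub c) (hkeys ▸ hnd) ?_
        intro k _ _ hkc
        refine hidxcov k c ?_
        rw [hcnt k c] at hkc
        exact List.count_pos_iff.mp (by exact_mod_cast hkc)
      simp only [pvLoopA, pvLoopB, ← hcongr, hkeys]
      rcases pvSweepSim d.keys d cnt sz sm p c hcnt hsz hsm with hnone | hsome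
      · rw [hnone.1, hnone.2]
      · obtain ⟨d', cnt', sz', sm', adds, hA, hB, h1, h2, h3, h4⟩ := hsome
        rw [hA, hB]
        obtain ⟨hk', hshr⟩ := pvSweep_some hA
        refine ihf idx d' cnt' sz' sm' (rest ++ adds)
          ⟨by rw [h4, hkeys, hk'], by rw [hk']; exact hnd, h1, h2, h3,
           fun c' => by rw [hk']; exact hidxsub c',
           fun k c' hc' => hidxcov k c' (hshr k c' hc')⟩

-- the four components of B's single set-up loop, separated for the analysis
def pvB1 (dd : PySem.Dict Int (PySem.Dict Int Int)) (kv : Int × List Int) :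
    PySem.Dict Int (PySem.Dict Int Int) :=
  dd.insert kv.1 (PySem.Dict.counter kv.2)
def pvB2 (dd : PySem.Dict Int Int) (kv : Int × List Int) : PySem.Dict Int Int :=
  dd.insert kv.1 (kv.2.length : Int)
def pvB3 (dd : PySem.Dict Int Int) (kv : Int × List Int) : PySem.Dict Int Int :=
  dd.insert kv.1 kv.2.sum
def pvB4 (dd : PySem.Dict Int (List Int)) (kv : Int × List Int) : PySem.Dict Int (List Int) :=
  (PySem.Dict.counter kv.2).keys.foldl (fun idx c => idx.modify c [] (· ++ [kv.1])) dd

theorem pvBuild_eq (l : List (Int × List Int))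
    (a : PySem.Dict Int (PySem.Dict Int Int)) (b c : PySem.Dict Int Int)
    (e : PySem.Dict Int (List Int)) :
    l.foldl pvBuildStep (a, b, c, e) =
      (l.foldl pvB1 a, l.foldl pvB2 b, l.foldl pvB3 c, l.foldl pvB4 e) := by
  induction l generalizing a b c e with
  | nil => rfl
  | cons kv l ih =>
    simp only [List.foldl_cons]
    rw [← ih]
    have hstep : pvBuildStep (a, b, c, e) kv = (pvB1 a kv, pvB2 b kv, pvB3 c kv, pvB4 e kv) := by
      simp [pvBuildStep, pvB1, pvB2, pvB3, pvB4,
        PySem.Dict.foldl_insert_getD_add_one_eq_counter]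
    rw [hstep]

-- on a nodup list, filtering for equality with c gives [c] or []
theorem pvFilter_eq_of_nodup {l : List Int} (hnd : l.Nodup) (c : Int) :
    l.filter (fun x => x == c) = if c ∈ l then [c] else [] := by
  induction l with
  | nil => simp
  | cons a l ih =>
    by_cases hac : a = c
    · subst hac
      rw [List.filter_cons_of_pos (by simp), ih hnd.of_cons,
        if_neg (List.nodup_cons.mp hnd).1, if_pos List.mem_cons_self]
    · rw [List.filter_cons_of_neg (by simp [hac]), ih hnd.of_cons]
      by_cases hcl : c ∈ l
      · rw [if_pos hcl, if_pos (List.mem_cons_of_mem _ hcl)]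
      · rw [if_neg hcl, if_neg (by simp only [List.mem_cons, hcl, or_false]; exact fun h => hac h.symm)]

-- the index-building fold, entrywise, for an arbitrary accumulator
theorem pvIdx_aux (l : List (Int × List Int)) (acc : PySem.Dict Int (List Int)) (c : Int) :
    (l.foldl pvB4 acc).getD c []
      = acc.getD c [] ++ (l.filter (fun kv => decide (c ∈ kv.2))).map (·.1) := by
  induction l generalizing acc with
  | nil => simp
  | cons kv l ih =>
    rw [List.foldl_cons, ih, List.filter_cons]
    have hinner : (pvB4 acc kv).getD c []
        = acc.getD c [] ++ (if c ∈ kv.2 then [kv.1] else []) := by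
      unfold pvB4
      rw [PySem.Dict.keys_counter]
      rw [← List.foldl_map (f := fun c' => ((c', kv.1) : Int × Int))
        (g := fun idx p => PySem.Dict.modify idx p.1 [] (· ++ [p.2]))]
      rw [PySem.Dict.getD_foldl_modify_append]
      congr 1
      rw [List.filter_map]
      have : ((fun p => p.1 == c) ∘ fun c' => ((c', kv.1) : Int × Int)) = fun c' => c' == c := rfl
      rw [this, pvFilter_eq_of_nodup (PySem.Set.nodup_ofList kv.2) c]
      by_cases hc : c ∈ kv.2
      · rw [if_pos ((PySem.Set.mem_ofList _ _).mpr hc), if_pos hc]; rfl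
      · rw [if_neg (fun h => hc ((PySem.Set.mem_ofList _ _).mp h)), if_neg hc]; rfl
    rw [hinner]
    by_cases hc : c ∈ kv.2
    · rw [if_pos hc, if_pos (by simpa using hc)]
      simp [List.append_assoc]
    · rw [if_neg hc, if_neg (by simpa using hc)]
      simp

-- B's set-up loop establishes the simulation invariant against the original dict
theorem pvRel_init (rp : List (Int × List Int)) :
    pvRel (PySem.Dict.ofList rp)
      ((PySem.Dict.ofList rp).items.foldl pvBuildStep
        (PySem.Dict.empty, PySem.Dict.empty, PySem.Dict.empty, PySem.Dict.empty)).1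
      ((PySem.Dict.ofList rp).items.foldl pvBuildStep
        (PySem.Dict.empty, PySem.Dict.empty, PySem.Dict.empty, PySem.Dict.empty)).2.1
      ((PySem.Dict.ofList rp).items.foldl pvBuildStep
        (PySem.Dict.empty, PySem.Dict.empty, PySem.Dict.empty, PySem.Dict.empty)).2.2.1
      ((PySem.Dict.ofList rp).items.foldl pvBuildStep
        (PySem.Dict.empty, PySem.Dict.empty, PySem.Dict.empty, PySem.Dict.empty)).2.2.2 := by
  rw [pvBuild_eq]
  set d := PySem.Dict.ofList rp with hd
  have hnd : d.keys.Nodup := PySem.Dict.nodup_keys_ofList rp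
  have hkeysl : d.keys = d.items.map (·.1) := rfl
  have hndl : (d.items.map (·.1)).Nodup := hkeysl ▸ hnd
  -- the three fresh-key insert loops
  have hit1 : (d.items.foldl pvB1 PySem.Dict.empty).items
      = d.items.map (fun kv => (kv.1, PySem.Dict.counter kv.2)) := by
    have := PySem.Dict.items_foldl_insert_fresh (l := d.items) (k := (·.1))
      (v := fun kv => PySem.Dict.counter kv.2) (d := PySem.Dict.empty)
      (fun a _ => by simp [PySem.Dict.contains_empty]) hndl
    simpa [pvB1] using this
  have hit2 : (d.items.foldl pvB2 PySem.Dict.empty).items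
      = d.items.map (fun kv => (kv.1, (kv.2.length : Int))) := by
    have := PySem.Dict.items_foldl_insert_fresh (l := d.items) (k := (·.1))
      (v := fun kv => (kv.2.length : Int)) (d := PySem.Dict.empty)
      (fun a _ => by simp [PySem.Dict.contains_empty]) hndl
    simpa [pvB2] using this
  have hit3 : (d.items.foldl pvB3 PySem.Dict.empty).items
      = d.items.map (fun kv => (kv.1, kv.2.sum)) := by
    have := PySem.Dict.items_foldl_insert_fresh (l := d.items) (k := (·.1))
      (v := fun kv => kv.2.sum) (d := PySem.Dict.empty)
      (fun a _ => by simp [PySem.Dict.contains_empty]) hndl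
    simpa [pvB3] using this
  have hkeys1 : (d.items.foldl pvB1 PySem.Dict.empty).keys = d.keys := by
    simp only [PySem.Dict.keys, hit1, List.map_map]
    rfl
  have hkeys2 : (d.items.foldl pvB2 PySem.Dict.empty).keys = d.keys := by
    simp only [PySem.Dict.keys, hit2, List.map_map]
    rfl
  have hkeys3 : (d.items.foldl pvB3 PySem.Dict.empty).keys = d.keys := by
    simp only [PySem.Dict.keys, hit3, List.map_map]
    rfl
  have hidx : ∀ c, (d.items.foldl pvB4 PySem.Dict.empty).getD c []
      = (d.items.filter (fun kv => decide (c ∈ kv.2))).map (·.1) := by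
    intro c
    rw [pvIdx_aux]
    simp [PySem.Dict.getD_empty]
  refine ⟨hkeys1, hnd, ?_, ?_, ?_, ?_, ?_⟩
  · -- counts
    intro j x
    rcases hg : d.get? j with _ | dom
    · have hdef : d.getD j [] = [] := PySem.Dict.getD_of_get?_eq_none _ [] hg
      have hnk : (d.items.foldl pvB1 PySem.Dict.empty).contains j = false := by
        rw [PySem.Dict.contains_eq_decide_mem_keys, hkeys1]
        simpa using (PySem.Dict.get?_eq_none_iff_not_mem_keys (d := d) (k := j)).mp hg
      rw [PySem.Dict.getD_of_not_contains _ _ hnk, hdef]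
      simp [PySem.Dict.getD_empty]
    · have hmemit : (j, dom) ∈ d.items := PySem.Dict.mem_items_of_get?_eq_some _ hg
      have hdom : d.getD j [] = dom := PySem.Dict.getD_of_get?_eq_some _ [] hg
      have hmem1 : (j, PySem.Dict.counter dom) ∈ (d.items.foldl pvB1 PySem.Dict.empty).items := by
        rw [hit1]; exact List.mem_map.mpr ⟨(j, dom), hmemit, rfl⟩
      have hnd1 : (d.items.foldl pvB1 PySem.Dict.empty).keys.Nodup := by rw [hkeys1]; exact hnd
      rw [PySem.Dict.getD_of_mem_items _ hmem1 hnd1 _, hdom, PySem.Dict.getD_counter]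
  · -- sizes
    intro j
    rcases hg : d.get? j with _ | dom
    · have hdef : d.getD j [] = [] := PySem.Dict.getD_of_get?_eq_none _ [] hg
      have hnk : (d.items.foldl pvB2 PySem.Dict.empty).contains j = false := by
        rw [PySem.Dict.contains_eq_decide_mem_keys, hkeys2]
        simpa using (PySem.Dict.get?_eq_none_iff_not_mem_keys (d := d) (k := j)).mp hg
      rw [PySem.Dict.getD_of_not_contains _ _ hnk, hdef]
      rfl
    · have hmemit : (j, dom) ∈ d.items := PySem.Dict.mem_items_of_get?_eq_some _ hg
      have hdom : d.getD j [] = dom := PySem.Dict.getD_of_get?_eq_some _ [] hg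
      have hmem2 : (j, (dom.length : Int)) ∈ (d.items.foldl pvB2 PySem.Dict.empty).items := by
        rw [hit2]; exact List.mem_map.mpr ⟨(j, dom), hmemit, rfl⟩
      have hnd2 : (d.items.foldl pvB2 PySem.Dict.empty).keys.Nodup := by rw [hkeys2]; exact hnd
      rw [PySem.Dict.getD_of_mem_items _ hmem2 hnd2 _, hdom]
  · -- sums
    intro j
    rcases hg : d.get? j with _ | dom
    · have hdef : d.getD j [] = [] := PySem.Dict.getD_of_get?_eq_none _ [] hg
      have hnk : (d.items.foldl pvB3 PySem.Dict.empty).contains j = false := by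
        rw [PySem.Dict.contains_eq_decide_mem_keys, hkeys3]
        simpa using (PySem.Dict.get?_eq_none_iff_not_mem_keys (d := d) (k := j)).mp hg
      rw [PySem.Dict.getD_of_not_contains _ _ hnk, hdef]
      rfl
    · have hmemit : (j, dom) ∈ d.items := PySem.Dict.mem_items_of_get?_eq_some _ hg
      have hdom : d.getD j [] = dom := PySem.Dict.getD_of_get?_eq_some _ [] hg
      have hmem3 : (j, dom.sum) ∈ (d.items.foldl pvB3 PySem.Dict.empty).items := by
        rw [hit3]; exact List.mem_map.mpr ⟨(j, dom), hmemit, rfl⟩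
      have hnd3 : (d.items.foldl pvB3 PySem.Dict.empty).keys.Nodup := by rw [hkeys3]; exact hnd
      rw [PySem.Dict.getD_of_mem_items _ hmem3 hnd3 _, hdom]
  · -- index lists are sublists of the keys
    intro c
    rw [hidx c, hkeysl]
    exact List.Sublist.map _ List.filter_sublist
  · -- index covers the domains
    intro k c hkc
    rcases hg : d.get? k with _ | dom
    · rw [PySem.Dict.getD_of_get?_eq_none _ [] hg] at hkc
      exact absurd hkc (by simp)
    · rw [PySem.Dict.getD_of_get?_eq_some _ [] hg] at hkc
      have hitem := PySem.Dict.mem_items_of_get?_eq_some _ hg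
      rw [hidx c]
      exact List.mem_map.mpr ⟨(k, dom), List.mem_filter.mpr ⟨hitem, by simpa using hkc⟩, rfl⟩

-- ===== VERDICT (by name: the statement is the Claim_ definition above) =====
theorem aroma_consistency_spec : Claim_equal_aroma_consistency := by
  intro rp sp ch _
  unfold Spec_aroma_consistency aroma_consistency aroma_consistency_alt
  exact pvLoopSim _ _ _ _ _ _ _ (pvRel_init rp)
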